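-- pv_equiv track=rewrite | github.com/james5635/GeekForGeek-Data-Structure-and-Algorithm | hashing/medium/kth_distinct_element/solution.py | kth_distinct_element_ordered
-- ===== SOURCE A (Python) =====
-- from collections import OrderedDict
--
-- def kth_distinct_element_ordered(arr, k):
--     """
--     Find kth distinct element using OrderedDict to maintain order.
--
--     Args:
--         arr: List of integers
--         k: Position of distinct element to find
--
--     Returns:
--         kth distinct element or None
--     """
--     if not arr or k <= 0:
--         return None
--
--     freq = OrderedDict()
--     for num in arr:
--         freq[num] = freq.get(num, 0) + 1
--
--     count = 0
--     for num, frequency in freq.items():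
--         if frequency == 1:
--             count += 1
--             if count == k:
--                 return num
--
--     return None
-- ===== SOURCE B (Python) =====
-- def kth_distinct_element_ordered(arr, k):
--     """Kth element occurring exactly once, in first-seen order.
--
--     Deletion-based single pass: no frequency counting.  `once` keeps the
--     elements seen exactly once so far (insertion-ordered dict used as an
--     ordered set); when an element reappears it is deleted from `once` and
--     blacklisted in `dup`.  The answer is then a direct index once[k-1].
--     """
--     if not arr or k <= 0:
--         return None
--     once = {}     # seen exactly once so far, in first-seen order
--     dup = set()   # seen at least twice
--     for x in arr:
--         if x in dup:
--             continue
--         if x in once: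
--             del once[x]
--             dup.add(x)
--         else:
--             once[x] = None
--     keys = list(once)
--     return keys[k - 1] if k <= len(keys) else None
-- ===== Notes on version B (the rewrite author's own statement) =====
-- stated objective: alternative
-- what changed: B never counts frequencies: a single deletion-based pass keeps an ordered set `once` of elements seen exactly once (deleting an element the moment it reappears and blacklisting it in `dup`), and the answer is a direct index once[k-1] instead of A's count-then-rescan over the OrderedDict's items with a running counter.
import Mathlib
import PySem

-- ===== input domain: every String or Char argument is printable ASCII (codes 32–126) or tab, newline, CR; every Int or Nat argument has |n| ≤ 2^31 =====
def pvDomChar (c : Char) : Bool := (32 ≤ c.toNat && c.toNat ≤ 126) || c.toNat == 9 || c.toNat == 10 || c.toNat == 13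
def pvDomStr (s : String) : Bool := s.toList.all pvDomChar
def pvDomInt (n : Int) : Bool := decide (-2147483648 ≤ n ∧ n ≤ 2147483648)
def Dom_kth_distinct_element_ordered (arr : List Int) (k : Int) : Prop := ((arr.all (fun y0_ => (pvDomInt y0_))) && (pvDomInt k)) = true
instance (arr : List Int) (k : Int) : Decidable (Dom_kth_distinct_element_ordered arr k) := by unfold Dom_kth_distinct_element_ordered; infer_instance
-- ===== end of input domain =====

-- B drops the frequency table entirely: one deletion-based pass keeps an ordered set of
-- elements seen exactly once, and the answer is a direct index into its key list (objective: alternative).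


-- ===== PORT A =====
-- A's second loop: over freq.items, count frequency-1 keys, return at count == k
def kthLoopA : List (Int × Int) → Int → Int → Option Int
  | [], _, _ => none
  | (num, frequency) :: rest, k, count =>
      if frequency == 1 then
        if count + 1 == k then some num else kthLoopA rest k (count + 1)
      else kthLoopA rest k count

def kth_distinct_element_ordered (arr : List Int) (k : Int) : Option Int :=
  if arr.isEmpty || k ≤ 0 then none
  else
    -- freq[num] = freq.get(num, 0) + 1 over arr
    let freq : PySem.Dict Int Int :=
      arr.foldl (fun d num => d.insert num (d.getD num 0 + 1)) PySem.Dict.empty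
    kthLoopA freq.items k 0

-- ===== PORT B =====
-- one iteration of B's loop over (once, dup): delete on second sight, blacklist in dup
def altStep (st : PySem.Dict Int (Option Int) × PySem.Set Int) (x : Int) :
    PySem.Dict Int (Option Int) × PySem.Set Int :=
  if PySem.Set.contains st.2 x then st
  else if st.1.contains x then (st.1.erase x, PySem.Set.add st.2 x)
  else (st.1.insert x none, st.2)

def kth_distinct_element_ordered_alt (arr : List Int) (k : Int) : Option Int :=
  if arr.isEmpty || k ≤ 0 then none
  else
    let keys := (arr.foldl altStep (PySem.Dict.empty, PySem.Set.empty)).1.keys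
    if k ≤ (keys.length : Int) then PySem.List.pyGet? keys (k - 1) else none

-- ===== PRECONDITION & SPEC =====
def Spec_kth_distinct_element_ordered (arr : List Int) (k : Int) (out : Option Int) : Prop := out = kth_distinct_element_ordered_alt arr k
instance (arr : List Int) (k : Int) (out : Option Int) : Decidable (Spec_kth_distinct_element_ordered arr k out) := by unfold Spec_kth_distinct_element_ordered; infer_instance

-- ===== CLAIM (what is proved, stated in full; the proofs are below) =====
def Claim_equal_kth_distinct_element_ordered : Prop := ∀ (arr : List Int) (k : Int), Dom_kth_distinct_element_ordered arr k → Spec_kth_distinct_element_ordered arr k (kth_distinct_element_ordered arr k)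

-- ===== LEMMAS AND PROOFS =====

-- the list of elements of arr occurring exactly once, in first-occurrence order
def onceList (arr : List Int) : List Int :=
  (PySem.Set.ofList arr).filter (fun x => decide (arr.count x = 1))

-- A's counting loop is "element of the filtered key sequence where the counter hits k"
def kthOf : List Int → Int → Int → Option Int
  | [], _, _ => none
  | x :: rest, k, c => if c + 1 == k then some x else kthOf rest k (c + 1)

theorem kthLoopA_eq_kthOf (l : List (Int × Int)) (k c : Int) :
    kthLoopA l k c = kthOf ((l.filter (fun p => p.2 == 1)).map Prod.fst) k c := by
  induction l generalizing c with
  | nil => rfl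
  | cons p rest ih =>
    obtain ⟨num, frequency⟩ := p
    by_cases h : frequency == 1
    · simp [kthLoopA, kthOf, h, ih]
    · simp [kthLoopA, h, ih]

theorem kthOf_eq_getElem? (l : List Int) (k c : Int) (h : c < k) :
    kthOf l k c = l[(k - c - 1).toNat]? := by
  induction l generalizing c with
  | nil => simp [kthOf]
  | cons x rest ih =>
    simp only [kthOf]
    by_cases he : c + 1 = k
    · have : (k - c - 1).toNat = 0 := by omega
      simp [he, this]
    · have hlt : c + 1 < k := by omega
      have hn : (k - c - 1).toNat = (k - (c + 1) - 1).toNat + 1 := by omega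
      rw [if_neg (by simpa using he), ih (c + 1) hlt, hn]
      simp

theorem ofList_append_singleton (p : List Int) (x : Int) :
    PySem.Set.ofList (p ++ [x]) = PySem.Set.add (PySem.Set.ofList p) x := by
  simp [PySem.Set.ofList_eq_foldl, List.foldl_append]

-- del once[x] in key-list terms
theorem keys_erase_eq_filter (d : PySem.Dict Int (Option Int)) (x : Int) :
    (d.erase x).keys = d.keys.filter (fun y => !(y == x)) := by
  simp [PySem.Dict.erase, PySem.Dict.keys, List.filter_map, Function.comp_def]

-- loop invariant for B's pass: the keys of `once` are the frequency-1 elements of the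
-- processed prefix p in first-occurrence order, `dup` is the set of elements with count ≥ 2
theorem altFold_once (rest : List Int) : ∀ (p : List Int) (d : PySem.Dict Int (Option Int)) (dup : PySem.Set Int),
    d.keys = onceList p →
    (∀ y, y ∈ dup ↔ 2 ≤ p.count y) →
    (rest.foldl altStep (d, dup)).1.keys = onceList (p ++ rest) := by
  induction rest with
  | nil => intro p d dup h1 _; simpa using h1
  | cons x rest' ih =>
    intro p d dup h1 h2
    have hassoc : p ++ x :: rest' = (p ++ [x]) ++ rest' := by simp
    rw [hassoc, List.foldl_cons]
    by_cases hd : x ∈ dup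
    · -- x already seen ≥ 2 times: state unchanged
      have hcnt : 2 ≤ p.count x := (h2 x).mp hd
      have hstep : altStep (d, dup) x = (d, dup) := by simp [altStep, hd]
      rw [hstep]
      apply ih (p ++ [x]) d dup
      · rw [h1]
        unfold onceList
        rw [ofList_append_singleton]
        have hxmem : x ∈ PySem.Set.ofList p := by
          rw [PySem.Set.mem_ofList]
          exact List.count_pos_iff.mp (by omega)
        have hadd : PySem.Set.add (PySem.Set.ofList p) x = PySem.Set.ofList p := by
          simp [PySem.Set.add, hxmem]
        rw [hadd]
        apply List.filter_congr
        intro y _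
        rcases eq_or_ne y x with rfl | hne
        · simp [List.count_append]
          omega
        · simp [List.count_append, hne.symm]
      · intro y
        rcases eq_or_ne y x with rfl | hne
        · simp [hd, List.count_append]
          exact List.count_pos_iff.mp (by omega)
        · simp [List.count_append, hne.symm, h2 y]
    · by_cases ho : d.contains x = true
      · -- second occurrence of x: delete it from once, blacklist it in dup
        have homem : x ∈ onceList p := h1 ▸ (PySem.Dict.contains_iff_mem_keys d x).mp ho
        have hcnt1 : p.count x = 1 := by
          have := List.of_mem_filter homem
          simpa using this
        have hstep : altStep (d, dup) x = (d.erase x, PySem.Set.add dup x) := by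
          simp [altStep, hd, ho]
        rw [hstep]
        apply ih (p ++ [x])
        · rw [keys_erase_eq_filter, h1]
          unfold onceList
          rw [ofList_append_singleton]
          have hxmem : x ∈ PySem.Set.ofList p := by
            rw [PySem.Set.mem_ofList]
            exact List.count_pos_iff.mp (by omega)
          have hadd : PySem.Set.add (PySem.Set.ofList p) x = PySem.Set.ofList p := by
            simp [PySem.Set.add, hxmem]
          rw [hadd, List.filter_filter]
          apply List.filter_congr
          intro y _
          rcases eq_or_ne y x with rfl | hne
          · simp [List.count_append, hcnt1]
          · simp [List.count_append, hne, hne.symm]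
        · intro y
          rw [PySem.Set.mem_add]
          rcases eq_or_ne y x with rfl | hne
          · simp [List.count_append, hcnt1]
          · simp [List.count_append, hne, hne.symm, h2 y]
      · -- first occurrence of x: append it to once
        have honm : x ∉ onceList p := fun hm =>
          ho ((PySem.Dict.contains_iff_mem_keys d x).mpr (h1 ▸ hm))
        have hcnt0 : p.count x = 0 := by
          by_contra hnz
          have hpos : 0 < p.count x := Nat.pos_of_ne_zero hnz
          have hle : p.count x ≤ 1 := by
            by_contra hgt
            exact hd ((h2 x).mpr (by omega))
          have hcx : p.count x = 1 := by omega
          apply honm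
          unfold onceList
          refine List.mem_filter.mpr ⟨?_, by simp [hcx]⟩
          rw [PySem.Set.mem_ofList]
          exact List.count_pos_iff.mp hpos
        have hoc : d.contains x = false := by simpa using ho
        have hstep : altStep (d, dup) x = (d.insert x none, dup) := by
          simp [altStep, hd, hoc]
        rw [hstep]
        apply ih (p ++ [x])
        · rw [PySem.Dict.keys_insert_of_not_contains d none hoc, h1]
          unfold onceList
          rw [ofList_append_singleton]
          have hxnm : x ∉ PySem.Set.ofList p := by
            rw [PySem.Set.mem_ofList]
            intro hmem
            have := List.count_pos_iff.mpr hmem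
            omega
          have hadd : PySem.Set.add (PySem.Set.ofList p) x
              = PySem.Set.ofList p ++ [x] := by
            simp [PySem.Set.add, hxnm]
          rw [hadd, List.filter_append]
          congr 1
          · apply List.filter_congr
            intro y hy
            have hne : y ≠ x := fun h => hxnm (h ▸ hy)
            simp [List.count_append, hne.symm]
          · simp [List.count_append, hcnt0]
        · intro y
          rcases eq_or_ne y x with rfl | hne
          · simp [hd, List.count_append, hcnt0]
          · simp [List.count_append, hne.symm, h2 y]

theorem altFold_eq_onceList (arr : List Int) :
    (arr.foldl altStep (PySem.Dict.empty, PySem.Set.empty)).1.keys = onceList arr := by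
  have := altFold_once arr [] PySem.Dict.empty PySem.Set.empty
    (by simp [onceList, PySem.Set.ofList, PySem.Dict.keys, PySem.Dict.empty])
    (by intro y; simp [PySem.Set.empty])
  simpa using this

-- A's filtered key sequence is exactly onceList
theorem itemsFiltered_eq_onceList (arr : List Int) :
    (((PySem.Dict.counter arr).items.filter (fun p => p.2 == 1)).map Prod.fst)
      = onceList arr := by
  rw [PySem.Dict.items_counter, List.filter_map, List.map_map]
  unfold onceList
  simp only [Function.comp_def, List.map_id']
  apply List.filter_congr
  intro y _
  rw [Bool.eq_iff_iff]
  simp only [beq_iff_eq, decide_eq_true_eq]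
  omega

-- ===== VERDICT (by name: the statement is the Claim_ definition above) =====
theorem kth_distinct_element_ordered_spec : Claim_equal_kth_distinct_element_ordered := by
  intro arr k _
  unfold Spec_kth_distinct_element_ordered kth_distinct_element_ordered kth_distinct_element_ordered_alt
  by_cases hg : arr.isEmpty || k ≤ 0
  · simp [hg]
  · have hk : 0 < k := by
      have hg' := hg
      simp only [Bool.or_eq_true, decide_eq_true_eq, not_or] at hg'
      omega
    simp only [hg, Bool.false_eq_true, if_false]
    rw [PySem.Dict.foldl_insert_getD_add_one_eq_counter, kthLoopA_eq_kthOf,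
      itemsFiltered_eq_onceList, altFold_eq_onceList,
      kthOf_eq_getElem? _ _ _ hk]
    set u := onceList arr with hu
    by_cases hlen : k ≤ (u.length : Int)
    · rw [if_pos hlen, PySem.List.pyGet?_of_nonneg u (by omega : (0:Int) ≤ k - 1)]
      norm_num
    · rw [if_neg hlen, List.getElem?_eq_none (by omega)]
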